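-- pv_equiv track=rewrite | github.com/AqeelAhmedBaloch/Personal-AI-Employee-Hackathon-0 | AI_Employee_Vault/orchestrator.py | _update_yaml_value
-- ===== SOURCE A (Python) =====
-- def _update_yaml_value(content: str, key: str, value: str) -> str:
--     """Update a YAML frontmatter value."""
--     lines = content.split('\n')
--     new_lines = []
--
--     for line in lines:
--         if line.startswith(f'{key}:'):
--             new_lines.append(f'{key}: {value}')
--         else:
--             new_lines.append(line)
--
--     return '\n'.join(new_lines)
-- ===== SOURCE B (Python) =====
-- import re
--
-- def _update_yaml_value(content: str, key: str, value: str) -> str: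
--     """Update a YAML frontmatter value (one regex substitution over the whole string)."""
--     pattern = re.compile(rf'^{re.escape(key)}:.*$', re.MULTILINE)
--     return pattern.sub(lambda m: f'{key}: {value}', content)
-- ===== Notes on version B (the rewrite author's own statement) =====
-- stated objective: idiomatic
-- what changed: B replaces A's split-into-lines / per-line loop / join by a single compiled-regex substitution over the whole string (re.sub of the MULTILINE-anchored pattern ^<escaped key>:.*$ with a function replacement), letting the regex engine locate and rewrite the matching lines in place.
-- outside the precondition, e.g. on _update_yaml_value('a\nb: 1\nc', 'a\nb', '9'): A returns 'a\nb: 1\nc', B returns 'a\nb: 9\nc'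
import Mathlib
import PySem

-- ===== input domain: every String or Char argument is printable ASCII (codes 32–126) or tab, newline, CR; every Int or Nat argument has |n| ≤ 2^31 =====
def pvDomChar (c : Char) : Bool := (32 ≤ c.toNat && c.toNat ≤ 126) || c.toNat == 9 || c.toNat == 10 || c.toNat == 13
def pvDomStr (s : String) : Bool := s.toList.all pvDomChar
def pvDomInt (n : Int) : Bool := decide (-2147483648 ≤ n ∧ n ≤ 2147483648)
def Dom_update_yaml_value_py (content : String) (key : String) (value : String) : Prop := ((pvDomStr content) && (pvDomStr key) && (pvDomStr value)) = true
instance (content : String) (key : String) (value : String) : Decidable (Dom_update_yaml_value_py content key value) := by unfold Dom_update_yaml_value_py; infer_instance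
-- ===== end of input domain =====

-- B replaces A's split/per-line-loop/join by ONE regex substitution over the whole string
-- (re.sub of the MULTILINE pattern ^<escaped key>:.*$), a different mechanism of similar cost.

-- ===== PORT A =====
def update_yaml_value_py (content : String) (key : String) (value : String) : String :=
  let lines := PySem.Chars.splitOn content.toList ['\n']
  let newLines := lines.foldl (fun acc line =>
    if PySem.Chars.startswith line (key.toList ++ [':']) then
      acc ++ [key.toList ++ ':' :: ' ' :: value.toList]
    else
      acc ++ [line]) []
  String.ofList (PySem.Chars.join ['\n'] newLines)

-- ===== PORT B =====
-- Hand port of re.sub(rf'^{re.escape(key)}:.*$', lambda m: f'{key}: {value}', content, re.M)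
-- (PySem has no regex): the pattern is anchored with '^' (MULTILINE), so the engine can only
-- match at position 0 or right after a '\n'; there it matches the literal key ++ ":" (re.escape
-- makes every key character literal) and then '.*$' consumes up to the next '\n' / end of
-- string; re.sub emits the replacement and resumes AFTER the match, unmatched characters are
-- copied.  pvReSub transcribes exactly this scan, line start by line start; it is exact on
-- every input (including keys containing '\n', where the literal pattern matches across the
-- copied newline, just as Python's re does).
def pvReSub (key val : List Char) (cs : List Char) : List Char :=
  if (key ++ [':']).isPrefixOf cs then
    -- the match: the literal key ++ ":", then '.*' = up to the next '\n'; emit the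
    -- replacement, resume scanning right after the match
    match h : cs.drop ((key ++ [':']).length + ((cs.drop (key ++ [':']).length).takeWhile (· ≠ '\n')).length) with
    | [] => key ++ ':' :: ' ' :: val
    | _ :: t => key ++ ':' :: ' ' :: val ++ '\n' :: pvReSub key val t
  else
    -- no match at this line start: copy the line and its newline, resume at the next line start
    if (cs.takeWhile (· ≠ '\n')).length < cs.length then
      cs.takeWhile (· ≠ '\n') ++ '\n' :: pvReSub key val (cs.drop ((cs.takeWhile (· ≠ '\n')).length + 1))
    else cs.takeWhile (· ≠ '\n')
termination_by cs.length
decreasing_by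
  · have hl := congrArg List.length h
    simp at hl
    omega
  · simp; omega

def update_yaml_value_py_alt (content : String) (key : String) (value : String) : String :=
  String.ofList (pvReSub key.toList value.toList content.toList)

-- ===== PRECONDITION & SPEC =====
-- Pre_ excludes keys containing a newline — impossible for a YAML frontmatter key — where A's
-- "no line ever matches" and B's regex match across the escaped literal newline are both
-- accidental corner behaviours no caller would specify.
def Pre_update_yaml_value_py (content : String) (key : String) (value : String) : Prop :=
  '\n' ∉ key.toList
instance (content : String) (key : String) (value : String) : Decidable (Pre_update_yaml_value_py content key value) := by unfold Pre_update_yaml_value_py; infer_instance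

def pvWitness_update_yaml_value_py : String × String × String := ("---\ntitle: old\n---\nbody", "title", "new")

def Spec_update_yaml_value_py (content : String) (key : String) (value : String) (out : String) : Prop := out = update_yaml_value_py_alt content key value
instance (content : String) (key : String) (value : String) (out : String) : Decidable (Spec_update_yaml_value_py content key value out) := by unfold Spec_update_yaml_value_py; infer_instance

-- ===== CLAIM (what is proved, stated in full; the proofs are below) =====
def Claim_equal_update_yaml_value_py : Prop := ∀ (content : String) (key : String) (value : String), Dom_update_yaml_value_py content key value → Pre_update_yaml_value_py content key value → Spec_update_yaml_value_py content key value (update_yaml_value_py content key value)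

-- ===== LEMMAS AND PROOFS =====

-- split on '\n' as the structural recursion both sides reduce to
def pvSplitNl (cs : List Char) : List (List Char) :=
  let line := cs.takeWhile (· ≠ '\n')
  if h : line.length < cs.length then line :: pvSplitNl (cs.drop (line.length + 1)) else [cs]
termination_by cs.length
decreasing_by simp; omega

theorem pvSplitNl_ne_nil (cs : List Char) : pvSplitNl cs ≠ [] := by
  unfold pvSplitNl; dsimp only; split <;> simp

theorem pvSplitNl_eq_cons (cs : List Char) (hlt : (cs.takeWhile (· ≠ '\n')).length < cs.length) :
    pvSplitNl cs = cs.takeWhile (· ≠ '\n') :: pvSplitNl (cs.drop ((cs.takeWhile (· ≠ '\n')).length + 1)) := by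
  rw [pvSplitNl]
  rw [dif_pos hlt]

theorem pvSplitNl_eq_single (cs : List Char) (hnlt : ¬ (cs.takeWhile (· ≠ '\n')).length < cs.length) :
    pvSplitNl cs = [cs] := by
  rw [pvSplitNl]
  rw [dif_neg hnlt]

theorem pvSplitNl_nil : pvSplitNl [] = [[]] := by
  rw [pvSplitNl]; simp

theorem pvSplitNl_cons_nl (rest : List Char) : pvSplitNl ('\n' :: rest) = [] :: pvSplitNl rest := by
  conv_lhs => rw [pvSplitNl]
  simp

def pvGlue (cur : List Char) : List (List Char) → List (List Char)
  | [] => [cur.reverse]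
  | p :: ps => (cur.reverse ++ p) :: ps

theorem pvSplitNl_cons (c : Char) (rest : List Char) (hc : c ≠ '\n') :
    pvSplitNl (c :: rest) =
      (if (rest.takeWhile (· ≠ '\n')).length < rest.length
        then (c :: rest.takeWhile (· ≠ '\n')) :: pvSplitNl (rest.drop ((rest.takeWhile (· ≠ '\n')).length + 1))
        else [c :: rest]) := by
  conv_lhs => rw [pvSplitNl]
  simp [hc]

theorem pvGlue_cons (c : Char) (cur : List Char) (rest : List Char) (hc : c ≠ '\n') :
    pvGlue cur (pvSplitNl (c :: rest)) = pvGlue (c :: cur) (pvSplitNl rest) := by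
  rw [pvSplitNl_cons c rest hc]
  conv_rhs => rw [pvSplitNl]
  split
  · simp [pvGlue]
  · simp [pvGlue]

theorem pvSplitOn_go_spec (fuel : Nat) : ∀ (l cur : List Char) (acc : List (List Char)),
    l.length ≤ fuel →
    PySem.Chars.splitOn.go ['\n'] fuel l cur acc = acc.reverse ++ pvGlue cur (pvSplitNl l) := by
  induction fuel with
  | zero =>
    intro l cur acc hl
    have hnil : l = [] := List.length_eq_zero_iff.mp (Nat.le_zero.mp hl)
    subst hnil
    rw [PySem.Chars.splitOn.go, pvSplitNl_nil]
    simp [pvGlue]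
  | succ fuel ih =>
    intro l cur acc hl
    cases l with
    | nil =>
      rw [PySem.Chars.splitOn.go, pvSplitNl_nil]
      · simp [pvGlue]
      · omega
    | cons c rest =>
      have hrest : rest.length ≤ fuel := by simpa using Nat.lt_succ_iff.mp (by simpa using hl)
      rw [PySem.Chars.splitOn.go]
      by_cases hc : c = '\n'
      · subst hc
        have hpre : List.isPrefixOf ['\n'] ('\n' :: rest) = true := by
          simp [List.isPrefixOf]
        rw [if_pos hpre]
        simp only [List.length_singleton, List.drop_succ_cons, List.drop_zero]
        rw [ih rest [] (cur.reverse :: acc) hrest, pvSplitNl_cons_nl]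
        obtain ⟨p, ps, hps⟩ : ∃ p ps, pvSplitNl rest = p :: ps := by
          cases h : pvSplitNl rest with
          | nil => exact absurd h (pvSplitNl_ne_nil rest)
          | cons p ps => exact ⟨p, ps, rfl⟩
        rw [hps]; simp [pvGlue]
      · have hpre : List.isPrefixOf ['\n'] (c :: rest) = false := by
          rw [Bool.eq_false_iff]
          intro h
          obtain ⟨t, ht⟩ := List.isPrefixOf_iff_prefix.mp h
          simp at ht
          exact hc ht.1.symm
        rw [if_neg (by simp [hpre])]
        rw [ih rest (c :: cur) acc hrest]
        rw [pvGlue_cons c cur rest hc]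

theorem pvSplitOn_nl (cs : List Char) : PySem.Chars.splitOn cs ['\n'] = pvSplitNl cs := by
  unfold PySem.Chars.splitOn
  rw [pvSplitOn_go_spec (cs.length + 1) cs [] [] (by omega)]
  obtain ⟨p, ps, hps⟩ : ∃ p ps, pvSplitNl cs = p :: ps := by
    cases h : pvSplitNl cs with
    | nil => exact absurd h (pvSplitNl_ne_nil cs)
    | cons p ps => exact ⟨p, ps, rfl⟩
  rw [hps]; simp [pvGlue]

-- a newline-free prefix of cs sits entirely inside cs's first line
theorem pvTakeWhile_of_prefix (p cs : List Char) (hp : p <+: cs) (hnl : '\n' ∉ p) :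
    cs.takeWhile (· ≠ '\n') = p ++ (cs.drop p.length).takeWhile (· ≠ '\n') := by
  obtain ⟨t, rfl⟩ := hp
  rw [List.takeWhile_append]
  have hall : ∀ c ∈ p, c ≠ '\n' := fun c hc h => hnl (h ▸ hc)
  have h1 : List.takeWhile (fun x => !decide (x = '\n')) p = p := by
    apply List.takeWhile_eq_self_iff.mpr
    simpa using hall
  simp [List.takeWhile_append, h1]

theorem pvFoldl_app (c : List Char → Bool) (r : List Char) (l : List (List Char)) (acc : List (List Char)) :
    l.foldl (fun a x => if c x then a ++ [r] else a ++ [x]) acc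
      = acc ++ l.map (fun x => if c x then r else x) := by
  induction l generalizing acc with
  | nil => simp
  | cons x xs ih => by_cases h : c x <;> simp [List.foldl, h, ih]

-- the core: under a newline-free key, the regex scan equals the per-line map
theorem pvReSub_eq (key val : List Char) (hnl : '\n' ∉ key) : ∀ (cs : List Char),
    pvReSub key val cs =
      PySem.Chars.join ['\n'] ((pvSplitNl cs).map
        (fun line => if (key ++ [':']).isPrefixOf line then key ++ ':' :: ' ' :: val else line)) := by
  have hnlp : '\n' ∉ key ++ [':'] := by
    simp only [List.mem_append, List.mem_singleton]
    rintro (h | h)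
    · exact hnl h
    · exact absurd h (by decide)
  intro cs
  induction cs using pvReSub.induct (key := key) with
  | case1 cs hp h =>
    have hline : cs.takeWhile (· ≠ '\n')
        = (key ++ [':']) ++ (cs.drop (key ++ [':']).length).takeWhile (· ≠ '\n') :=
      pvTakeWhile_of_prefix _ _ (List.isPrefixOf_iff_prefix.mp hp) hnlp
    have hlen1 : (cs.takeWhile (· ≠ '\n')).length ≤ cs.length := (List.takeWhile_prefix _).length_le
    have hlen2 : cs.length ≤ ((key ++ [':']) ++ (cs.drop (key ++ [':']).length).takeWhile (· ≠ '\n')).length := by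
      have := congrArg List.length h
      simp at this ⊢
      omega
    have hba : cs.length ≤ (cs.takeWhile (· ≠ '\n')).length := by
      rw [hline]; exact hlen2
    have hcs : cs.takeWhile (· ≠ '\n') = cs :=
      (List.takeWhile_prefix _).eq_of_length (Nat.le_antisymm hlen1 hba)
    have hsplit : pvSplitNl cs = [cs] := pvSplitNl_eq_single cs (by omega)
    rw [pvReSub, if_pos hp]
    rw [hsplit]
    simp only [List.map_cons, List.map_nil, PySem.Chars.join_singleton, if_pos hp]
    split
    · rfl
    · rename_i heq
      rw [h] at heq
      exact absurd heq (by simp)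
  | case2 cs hp c t h ih =>
    have hline : cs.takeWhile (· ≠ '\n')
        = (key ++ [':']) ++ (cs.drop (key ++ [':']).length).takeWhile (· ≠ '\n') :=
      pvTakeWhile_of_prefix _ _ (List.isPrefixOf_iff_prefix.mp hp) hnlp
    have hlenline : (cs.takeWhile (· ≠ '\n')).length
        = (key ++ [':']).length + ((cs.drop (key ++ [':']).length).takeWhile (· ≠ '\n')).length := by
      rw [hline]; simp; omega
    have hlt : (cs.takeWhile (· ≠ '\n')).length < cs.length := by
      have hh := congrArg List.length h
      rw [hlenline]
      simp at hh ⊢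
      omega
    have ht : cs.drop ((cs.takeWhile (· ≠ '\n')).length + 1) = t := by
      rw [← List.tail_drop, hlenline, h]
      rfl
    have hsplit : pvSplitNl cs = cs.takeWhile (· ≠ '\n') :: pvSplitNl t := by
      rw [pvSplitNl_eq_cons cs hlt, ht]
    have hpl : (key ++ [':']).isPrefixOf (cs.takeWhile (· ≠ '\n')) = true :=
      List.isPrefixOf_iff_prefix.mpr ⟨_, hline.symm⟩
    obtain ⟨p, ps, hps⟩ : ∃ p ps, pvSplitNl t = p :: ps := by
      cases hx : pvSplitNl t with
      | nil => exact absurd hx (pvSplitNl_ne_nil t)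
      | cons p ps => exact ⟨p, ps, rfl⟩
    rw [hps] at ih
    rw [pvReSub, if_pos hp, hsplit, hps]
    split
    · rename_i heq
      rw [h] at heq
      exact absurd heq (by simp)
    · rename_i c' t' heq
      rw [h] at heq
      injection heq with h1 h2
      subst h2
      rw [ih]
      have hpl2 : key ++ [':'] <+: cs.takeWhile (fun x => !decide (x = '\n')) := by
        simpa using List.isPrefixOf_iff_prefix.mp hpl
      simp [PySem.Chars.join_cons_cons, hpl2, List.append_assoc]
  | case3 cs hp hlt ih =>
    have hnp : ¬ (key ++ [':']).isPrefixOf (cs.takeWhile (· ≠ '\n')) = true := by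
      intro hc
      exact hp (List.isPrefixOf_iff_prefix.mpr
        ((List.isPrefixOf_iff_prefix.mp hc).trans (List.takeWhile_prefix _)))
    have hsplit : pvSplitNl cs
        = cs.takeWhile (· ≠ '\n') :: pvSplitNl (cs.drop ((cs.takeWhile (· ≠ '\n')).length + 1)) :=
      pvSplitNl_eq_cons cs hlt
    obtain ⟨p, ps, hps⟩ : ∃ p ps, pvSplitNl (cs.drop ((cs.takeWhile (· ≠ '\n')).length + 1)) = p :: ps := by
      cases hx : pvSplitNl (cs.drop ((cs.takeWhile (· ≠ '\n')).length + 1)) with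
      | nil => exact absurd hx (pvSplitNl_ne_nil _)
      | cons p ps => exact ⟨p, ps, rfl⟩
    rw [hps] at ih
    have hnp2 : ¬ (key ++ [':'] <+: cs.takeWhile (fun x => !decide (x = '\n'))) := by
      intro hc
      exact hnp (List.isPrefixOf_iff_prefix.mpr (by simpa using hc))
    rw [pvReSub, if_neg hp, if_pos hlt, hsplit, hps, ih]
    simp [PySem.Chars.join_cons_cons, hnp2, List.append_assoc]
  | case4 cs hp hlt =>
    have hcs : cs.takeWhile (· ≠ '\n') = cs :=
      (List.takeWhile_prefix _).eq_of_length
        (Nat.le_antisymm (List.takeWhile_prefix _).length_le (Nat.le_of_not_lt hlt))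
    have hsplit : pvSplitNl cs = [cs] := pvSplitNl_eq_single cs hlt
    have hp2 : ¬ (key ++ [':'] <+: cs) := fun hc => hp (List.isPrefixOf_iff_prefix.mpr hc)
    rw [pvReSub, if_neg hp, if_neg hlt, hsplit, hcs]
    simp [PySem.Chars.join_singleton, hp2]

-- ===== VERDICT (by name: the statement is the Claim_ definition above) =====
theorem update_yaml_value_py_spec : Claim_equal_update_yaml_value_py := by
  intro content key value _ hpre
  simp only [Spec_update_yaml_value_py, update_yaml_value_py, update_yaml_value_py_alt]
  rw [pvSplitOn_nl, pvReSub_eq key.toList value.toList hpre, pvFoldl_app]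
  simp [PySem.Chars.startswith]
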